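-- pv_equiv track=rewrite | github.com/naroahlee/DS_Queue_Sim | lib/server_model.py | run_D_FIFO_PS_server_DT
-- ===== SOURCE A (Python) =====
-- def run_D_FIFO_PS_server_DT(budget, period, service_dur, arrival_evt):
-- 	# Sanity Check
-- 	assert(int(budget) == budget)
-- 	assert(int(period) == period)
-- 	assert(int(service_dur) == service_dur)
-- 	for item in arrival_evt:
-- 		assert(int(item) == item)
--
-- 	atserver_evt = []
-- 	leave_evt    = []
--
-- 	index = 0
--
-- 	state = 0; # IDLE
--
-- 	# Set the initial Offset = P - B
-- 	offset = period - budget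
-- 	cur_time = offset;
--
-- 	next_period   = period + offset;
-- 	while (index < len(arrival_evt)):
-- 		if(0 == state): # IDLE
-- 			cur_time = arrival_evt[index]
-- 			if(cur_time <= offset):			# Align the fist period
-- 				cur_time = offset
--
-- 			while(cur_time >= next_period): # Update Period Based on Cur_time
-- 				next_period += period
--
-- 			# Check which phase cur_time in a period: available or N/A
-- 			if(cur_time >= (next_period - period + budget)): # Not available, miss the first B time of current period
-- 				cur_time = next_period
-- 				next_period += period
--
-- 			state = 1
--
-- 		if(1 == state): # Execution
-- 			while((index < len(arrival_evt)) and (cur_time >= arrival_evt[index])):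
-- 				atserver_evt.append(cur_time);
--
-- 				remain_budget = (next_period - period + budget) - cur_time
-- 				if(remain_budget >= service_dur): # If old period can still handle
-- 					cur_time += service_dur
-- 					# next_period = next_period   # next_period unchanged
-- 				else:
-- 					# First, burn up all the remain debris
-- 					cur_time = next_period	# Uneven Budget Replenishment
-- 					next_period += period
-- 					service_remain = service_dur - remain_budget
--
-- 					# Use Multiple whole PS period for serving
-- 					# Yes, you can directly compute it if you want
-- 					while(service_remain > budget):
-- 						cur_time = next_period
-- 						next_period += period
-- 						service_remain -= budget
--
-- 					# Now the last potion of service_remain is less than budget: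
-- 					cur_time += service_remain
--
-- 				leave_evt.append(cur_time);
-- 				index += 1
-- 			state = 0
--
-- 	return (atserver_evt, leave_evt)
-- ===== SOURCE B (Python) =====
-- def run_D_FIFO_PS_server_DT(budget, period, service_dur, arrival_evt):
--     # closed-form floor-division jumps instead of quantum-by-quantum
--     # period-advance loops; one pass over the arrivals.
--     atserver_evt = []
--     leave_evt = []
--     offset = period - budget
--     cur = offset
--     nxt = period + offset
--     for a in arrival_evt:
--         if cur < a:
--             # server went idle; wake at this arrival (clamped to the offset)
--             cur = a if a > offset else offset
--             if cur >= nxt: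
--                 nxt += ((cur - nxt) // period + 1) * period
--             if cur >= nxt - period + budget:
--                 cur = nxt
--                 nxt += period
--         atserver_evt.append(cur)
--         remain = (nxt - period + budget) - cur
--         if remain >= service_dur:
--             cur += service_dur
--         else:
--             sr = service_dur - remain
--             n = (sr - 1) // budget
--             cur = nxt + n * period + (sr - n * budget)
--             nxt += (n + 1) * period
--         leave_evt.append(cur)
--     return (atserver_evt, leave_evt)
-- ===== Notes on version B (the rewrite author's own statement) =====
-- stated objective: alternative
-- what changed: Replaced A's quantum-by-quantum while-loops (advancing next_period one period at a time and burning the service budget one period at a time) with closed-form floor-division jumps inside a single pass over the arrivals.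
-- outside the precondition, e.g. on run_D_FIFO_PS_server_DT(2, 0, 1, [5]): A does not finish within the time limit, B raises ZeroDivisionError; on run_D_FIFO_PS_server_DT(0, 3, 0, [-2, 2]): A returns ([6, 6], [6, 6]), B returns ([3, 3], [3, 3])
import Mathlib
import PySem

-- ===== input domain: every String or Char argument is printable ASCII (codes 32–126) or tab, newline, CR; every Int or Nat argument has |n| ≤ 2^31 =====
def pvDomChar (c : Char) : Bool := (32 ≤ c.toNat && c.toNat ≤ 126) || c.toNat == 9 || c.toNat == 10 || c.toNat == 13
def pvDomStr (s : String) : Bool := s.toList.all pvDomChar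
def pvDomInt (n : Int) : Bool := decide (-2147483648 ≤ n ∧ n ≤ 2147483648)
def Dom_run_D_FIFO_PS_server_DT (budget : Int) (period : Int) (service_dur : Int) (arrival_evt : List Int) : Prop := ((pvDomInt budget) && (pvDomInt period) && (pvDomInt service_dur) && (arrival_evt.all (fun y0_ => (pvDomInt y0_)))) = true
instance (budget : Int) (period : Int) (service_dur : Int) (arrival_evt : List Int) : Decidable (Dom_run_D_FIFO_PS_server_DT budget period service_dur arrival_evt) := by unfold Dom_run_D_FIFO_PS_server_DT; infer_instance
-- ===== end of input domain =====

-- B replaces A's quantum-by-quantum period-advance loops with closed-form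
-- floor-division jumps, in a single pass over the arrivals.

-- ===== PORT A =====
-- 'while cur_time >= next_period: next_period += period' (fuel-guarded; the fuel
-- bound is sufficient whenever period ≥ 1, i.e. whenever the Python loop terminates)
def alignA (period : Int) : Nat → Int → Int → Int
  | 0, _, np => np
  | f+1, ct, np => if np ≤ ct then alignA period f ct (np + period) else np

-- 'while service_remain > budget: cur=np; np+=period; sr-=budget' (fuel-guarded)
def burnA (budget period : Int) : Nat → Int → Int → Int → Int × Int × Int
  | 0, ct, np, sr => (ct, np, sr)
  | f+1, ct, np, sr =>
    if budget < sr then burnA budget period f np (np + period) (sr - budget)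
    else (ct, np, sr)

-- the body of A's EXEC loop after the append: remain-budget branch
def serveA (budget period service_dur ct np : Int) : Int × Int :=
  let rb := (np - period + budget) - ct
  if service_dur ≤ rb then (ct + service_dur, np)
  else
    let sr := service_dur - rb
    let r := burnA budget period ((sr - budget).toNat + 1) np (np + period) sr
    (r.1 + r.2.2, r.2.1)

-- A's state-1 inner while over the remaining arrivals: returns (atserver, leave, ct, np, rest)
def execA (budget period service_dur : Int) :
    List Int → Int → Int → List Int × List Int × Int × Int × List Int
  | [], ct, np => ([], [], ct, np, [])
  | a :: rest, ct, np =>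
    if a ≤ ct then
      let s := serveA budget period service_dur ct np
      let r := execA budget period service_dur rest s.1 s.2
      (ct :: r.1, s.1 :: r.2.1, r.2.2)
    else ([], [], ct, np, a :: rest)

-- A's IDLE block (cur_time is overwritten by the arrival, so the old ct is not a parameter)
def idleA (budget period offset a np : Int) : Int × Int :=
  let ct := a
  let ct := if ct ≤ offset then offset else ct
  let np := alignA period ((ct - np).toNat + 1) ct np
  if np - period + budget ≤ ct then (np, np + period) else (ct, np)

-- A's outer 'while index < len' loop; each iteration runs IDLE then EXEC
def outerA (budget period service_dur offset : Int) :
    Nat → List Int → Int → Int → List Int × List Int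
  | _, [], _, _ => ([], [])
  | 0, _ :: _, _, _ => ([], [])
  | f+1, a :: rest, _, np =>
    let i := idleA budget period offset a np
    let e := execA budget period service_dur (a :: rest) i.1 i.2
    let r := outerA budget period service_dur offset f e.2.2.2.2 e.2.2.1 e.2.2.2.1
    (e.1 ++ r.1, e.2.1 ++ r.2)

def run_D_FIFO_PS_server_DT (budget : Int) (period : Int) (service_dur : Int) (arrival_evt : List Int) : List Int × List Int :=
  let offset := period - budget
  outerA budget period service_dur offset (arrival_evt.length + 1) arrival_evt offset (period + offset)

-- ===== PORT B =====
-- B's idle branch: wake at max(a, offset), realign the period by one floor division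
def idleB (budget period offset a nxt : Int) : Int × Int :=
  let cur := if offset < a then a else offset
  let nxt := if nxt ≤ cur then nxt + (PySem.Int.floordiv (cur - nxt) period + 1) * period else nxt
  if nxt - period + budget ≤ cur then (nxt, nxt + period) else (cur, nxt)

-- B's service step: whole burnt periods counted by one floor division
def serveB (budget period service_dur cur nxt : Int) : Int × Int :=
  let remain := (nxt - period + budget) - cur
  if service_dur ≤ remain then (cur + service_dur, nxt)
  else
    let sr := service_dur - remain
    let n := PySem.Int.floordiv (sr - 1) budget
    (nxt + n * period + (sr - n * budget), nxt + (n + 1) * period)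

-- one iteration of B's for-loop; state = (atserver_evt, leave_evt, cur, nxt)
def stepB (budget period offset service_dur : Int)
    (st : List Int × List Int × Int × Int) (a : Int) : List Int × List Int × Int × Int :=
  let s := if st.2.2.1 < a then idleB budget period offset a st.2.2.2 else (st.2.2.1, st.2.2.2)
  let s2 := serveB budget period service_dur s.1 s.2
  (st.1 ++ [s.1], st.2.1 ++ [s2.1], s2.1, s2.2)

def run_D_FIFO_PS_server_DT_alt (budget : Int) (period : Int) (service_dur : Int) (arrival_evt : List Int) : List Int × List Int :=
  let offset := period - budget
  let r := arrival_evt.foldl (stepB budget period offset service_dur) ([], [], offset, period + offset)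
  (r.1, r.2.1)

-- ===== PRECONDITION & SPEC =====
-- Pre_ excludes nonpositive budget or period with a nonempty arrival list: outside the
-- natural domain of a periodic server A's quantum-advance while-loops usually diverge,
-- and where they happen to stop the value is an accident of the loop's stopping point.
def Pre_run_D_FIFO_PS_server_DT (budget : Int) (period : Int) (service_dur : Int) (arrival_evt : List Int) : Prop :=
  arrival_evt = [] ∨ (1 ≤ budget ∧ 1 ≤ period)

instance (budget : Int) (period : Int) (service_dur : Int) (arrival_evt : List Int) : Decidable (Pre_run_D_FIFO_PS_server_DT budget period service_dur arrival_evt) := by unfold Pre_run_D_FIFO_PS_server_DT; infer_instance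

def pvWitness_run_D_FIFO_PS_server_DT : Int × Int × Int × List Int := (2, 5, 3, [0, 4, 20])

def Spec_run_D_FIFO_PS_server_DT (budget : Int) (period : Int) (service_dur : Int) (arrival_evt : List Int) (out : List Int × List Int) : Prop := out = run_D_FIFO_PS_server_DT_alt budget period service_dur arrival_evt
instance (budget : Int) (period : Int) (service_dur : Int) (arrival_evt : List Int) (out : List Int × List Int) : Decidable (Spec_run_D_FIFO_PS_server_DT budget period service_dur arrival_evt out) := by unfold Spec_run_D_FIFO_PS_server_DT; infer_instance

-- ===== CLAIM (what is proved, stated in full; the proofs are below) =====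
def Claim_equal_run_D_FIFO_PS_server_DT : Prop := ∀ (budget : Int) (period : Int) (service_dur : Int) (arrival_evt : List Int), Dom_run_D_FIFO_PS_server_DT budget period service_dur arrival_evt → Pre_run_D_FIFO_PS_server_DT budget period service_dur arrival_evt → Spec_run_D_FIFO_PS_server_DT budget period service_dur arrival_evt (run_D_FIFO_PS_server_DT budget period service_dur arrival_evt)

-- ===== LEMMAS AND PROOFS =====

theorem fd_char {a b : Int} (hb : 0 < b) :
    PySem.Int.floordiv a b * b ≤ a ∧ a < (PySem.Int.floordiv a b + 1) * b :=
  (PySem.Int.floordiv_eq_iff_of_pos hb).mp rfl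

theorem fd_shift {x b : Int} (hb : 0 < b) :
    PySem.Int.floordiv (x + b) b = PySem.Int.floordiv x b + 1 := by
  obtain ⟨h1, h2⟩ := fd_char (a := x) hb
  rw [PySem.Int.floordiv_eq_iff_of_pos hb]
  constructor <;> nlinarith

theorem fd_zero {x b : Int} (hb : 0 < b) (h0 : 0 ≤ x) (h1 : x < b) :
    PySem.Int.floordiv x b = 0 := by
  rw [PySem.Int.floordiv_eq_iff_of_pos hb]
  constructor <;> nlinarith

theorem align_closed {period : Int} (hp : 1 ≤ period) :
    ∀ (f : Nat) (ct np : Int), ct - np < (f : Int) →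
      alignA period f ct np =
        if np ≤ ct then np + (PySem.Int.floordiv (ct - np) period + 1) * period else np := by
  intro f
  induction f with
  | zero =>
    intro ct np h
    rw [alignA, if_neg (by omega)]
  | succ f ih =>
    intro ct np h
    by_cases hle : np ≤ ct
    · have hfuel : ct - (np + period) < (f : Int) := by push_cast at h ⊢; omega
      rw [alignA, if_pos hle, ih ct (np + period) hfuel, if_pos hle]
      by_cases hle2 : np + period ≤ ct
      · rw [if_pos hle2]
        have hsh : PySem.Int.floordiv (ct - np) period
            = PySem.Int.floordiv (ct - (np + period)) period + 1 := by
          have h1 := fd_shift (x := ct - (np + period)) (b := period) (by omega)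
          rw [← h1]; congr 1; ring
        rw [hsh]; ring
      · rw [if_neg hle2]
        have h0 : PySem.Int.floordiv (ct - np) period = 0 :=
          fd_zero (by omega) (by omega) (by omega)
        rw [h0]; ring
    · rw [alignA, if_neg hle, if_neg hle]

theorem burn_closed {budget period : Int} (hb : 1 ≤ budget) :
    ∀ (f : Nat) (ct np sr : Int), sr - budget < (f : Int) →
      burnA budget period f ct np sr =
        if budget < sr then
          let n := PySem.Int.floordiv (sr - 1) budget
          (np + (n - 1) * period, np + n * period, sr - n * budget)
        else (ct, np, sr) := by
  intro f
  induction f with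
  | zero =>
    intro ct np sr h
    rw [burnA, if_neg (by omega)]
  | succ f ih =>
    intro ct np sr h
    by_cases hlt : budget < sr
    · have hfuel : sr - budget - budget < (f : Int) := by push_cast at h ⊢; omega
      rw [burnA, if_pos hlt, ih np (np + period) (sr - budget) hfuel]
      by_cases hlt2 : budget < sr - budget
      · rw [if_pos hlt2]
        have hn : PySem.Int.floordiv (sr - 1) budget
            = PySem.Int.floordiv (sr - budget - 1) budget + 1 := by
          have h1 := fd_shift (x := sr - budget - 1) (b := budget) (by omega)
          rw [← h1]; congr 1; ring
        simp only [if_pos hlt, hn]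
        refine Prod.ext ?_ (Prod.ext ?_ ?_) <;> simp <;> ring
      · rw [if_neg hlt2, if_pos hlt]
        have hn : PySem.Int.floordiv (sr - 1) budget = 1 := by
          have h0 : PySem.Int.floordiv (sr - 1 - budget) budget = 0 :=
            fd_zero (by omega) (by omega) (by omega)
          have := fd_shift (x := sr - 1 - budget) (b := budget) (by omega)
          have e : sr - 1 - budget + budget = sr - 1 := by ring
          rw [e] at this
          rw [this, h0]
          omega
        simp only [hn]
        refine Prod.ext ?_ (Prod.ext ?_ ?_) <;> simp <;> ring
    · rw [burnA, if_neg hlt, if_neg hlt]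

theorem serve_eq {budget : Int} (hb : 1 ≤ budget) (period service_dur ct np : Int) :
    serveA budget period service_dur ct np = serveB budget period service_dur ct np := by
  simp only [serveA, serveB]
  by_cases hle : service_dur ≤ (np - period + budget) - ct
  · simp [hle]
  · simp only [if_neg hle]
    set rb := (np - period + budget) - ct with hrb
    set sr := service_dur - rb with hsr
    have hsr1 : 1 ≤ sr := by omega
    rw [burn_closed hb _ _ _ _ (by push_cast; omega)]
    by_cases hlt : budget < sr
    · simp only [if_pos hlt]
      refine Prod.ext ?_ ?_ <;> simp <;> ring
    · simp only [if_neg hlt]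
      have hn : PySem.Int.floordiv (sr - 1) budget = 0 :=
        fd_zero (by omega) (by omega) (by omega)
      rw [hn]
      refine Prod.ext ?_ ?_ <;> simp <;> ring

theorem idle_eq {budget period : Int} (hb : 1 ≤ budget) (hp : 1 ≤ period)
    (offset a np : Int) :
    idleA budget period offset a np = idleB budget period offset a np := by
  simp only [idleA, idleB]
  have hct : (if a ≤ offset then offset else a) = (if offset < a then a else offset) := by
    by_cases h : a ≤ offset <;> simp [h] <;> omega
  rw [hct]
  rw [align_closed hp _ _ _ (by push_cast; omega)]

-- after B's idle branch the server time has reached the arrival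
theorem idle_ge {budget period : Int} (hb : 1 ≤ budget) (hp : 1 ≤ period)
    (offset a np : Int) : a ≤ (idleB budget period offset a np).1 := by
  simp only [idleB]
  set ct := if offset < a then a else offset with hctdef
  have hact : a ≤ ct := by rw [hctdef]; split_ifs <;> omega
  set np' := if np ≤ ct then np + (PySem.Int.floordiv (ct - np) period + 1) * period else np with hnp'
  have hctnp : ct < np' := by
    rw [hnp']
    by_cases h : np ≤ ct
    · obtain ⟨h1, h2⟩ := fd_char (a := ct - np) (b := period) (by omega)
      rw [if_pos h]; nlinarith
    · rw [if_neg h]; omega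
  by_cases h2 : np' - period + budget ≤ ct
  · simp only [if_pos h2]; omega
  · simp only [if_neg h2]; exact hact

-- B's cons-style recursion (proof-only helper)
def bfold (budget period offset service_dur : Int) :
    List Int → Int → Int → List Int × List Int × Int × Int
  | [], ct, np => ([], [], ct, np)
  | a :: rest, ct, np =>
    let s := if ct < a then idleB budget period offset a np else (ct, np)
    let s2 := serveB budget period service_dur s.1 s.2
    let r := bfold budget period offset service_dur rest s2.1 s2.2
    (s.1 :: r.1, s2.1 :: r.2.1, r.2.2)

theorem foldl_stepB (budget period offset service_dur : Int) :
    ∀ (l : List Int) (ats lvs : List Int) (ct np : Int),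
      List.foldl (stepB budget period offset service_dur) (ats, lvs, ct, np) l =
        (ats ++ (bfold budget period offset service_dur l ct np).1,
         lvs ++ (bfold budget period offset service_dur l ct np).2.1,
         (bfold budget period offset service_dur l ct np).2.2) := by
  intro l
  induction l with
  | nil => intro ats lvs ct np; simp [bfold]
  | cons a rest ih =>
    intro ats lvs ct np
    simp only [List.foldl_cons, stepB, bfold, ih]
    simp [List.append_assoc]

-- main glue: A's exec-then-outer from any state equals B's recursion
theorem master {budget period : Int} (hb : 1 ≤ budget) (hp : 1 ≤ period)
    (service_dur offset : Int) :
    ∀ (n : Nat) (l : List Int) (ct np : Int) (f : Nat), l.length ≤ n → l.length < f →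
      (let e := execA budget period service_dur l ct np
       let r := outerA budget period service_dur offset f e.2.2.2.2 e.2.2.1 e.2.2.2.1
       (e.1 ++ r.1, e.2.1 ++ r.2)) =
      ((bfold budget period offset service_dur l ct np).1,
       (bfold budget period offset service_dur l ct np).2.1) := by
  intro n
  induction n with
  | zero =>
    intro l ct np f hn hf
    have : l = [] := List.length_eq_zero_iff.mp (Nat.le_zero.mp hn)
    subst this
    cases f with
    | zero => omega
    | succ f => simp [execA, outerA, bfold]
  | succ n ih =>
    intro l ct np f hn hf
    cases l with
    | nil =>
      cases f with
      | zero => omega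
      | succ f => simp [execA, outerA, bfold]
    | cons a rest =>
      by_cases hct : a ≤ ct
      · -- server busy: exec consumes the head directly
        simp only [execA, if_pos hct, bfold, if_neg (by omega : ¬ ct < a)]
        rw [serve_eq hb]
        have hstep := ih rest (serveB budget period service_dur ct np).1
          (serveB budget period service_dur ct np).2 f
          (by simp at hn; omega) (by simp at hf; omega)
        simp only [] at hstep
        have h1 := congrArg Prod.fst hstep
        have h2 := congrArg Prod.snd hstep
        simp only [] at h1 h2
        simp only [List.cons_append, Prod.mk.injEq]
        exact ⟨by rw [h1], by rw [h2]⟩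
      · -- server idle: exec returns everything, outer runs IDLE then EXEC
        have hlt : ct < a := by omega
        simp only [execA, if_neg hct]
        cases f with
        | zero => omega
        | succ f =>
          simp only [outerA]
          rw [idle_eq hb hp]
          have hge : a ≤ (idleB budget period offset a np).1 := idle_ge hb hp offset a np
          simp only [execA, if_pos hge]
          rw [serve_eq hb]
          have hstep := ih rest
            (serveB budget period service_dur (idleB budget period offset a np).1 (idleB budget period offset a np).2).1
            (serveB budget period service_dur (idleB budget period offset a np).1 (idleB budget period offset a np).2).2
            f (by simp at hn; omega) (by simp at hf; omega)
          simp only [] at hstep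
          have h1 := congrArg Prod.fst hstep
          have h2 := congrArg Prod.snd hstep
          simp only [] at h1 h2
          simp only [bfold, if_pos hlt]
          simp only [List.nil_append, List.cons_append, Prod.mk.injEq]
          exact ⟨by rw [h1], by rw [h2]⟩

-- ===== VERDICT (by name: the statement is the Claim_ definition above) =====
theorem run_D_FIFO_PS_server_DT_spec : Claim_equal_run_D_FIFO_PS_server_DT := by
  intro budget period service_dur arrival_evt _ hpre
  simp only [Spec_run_D_FIFO_PS_server_DT, run_D_FIFO_PS_server_DT, run_D_FIFO_PS_server_DT_alt]
  cases arrival_evt with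
  | nil => simp [outerA, foldl_stepB, bfold]
  | cons a rest =>
    obtain ⟨hb, hp⟩ : 1 ≤ budget ∧ 1 ≤ period := by
      rcases hpre with h | h
      · exact absurd h (by simp)
      · exact h
    rw [foldl_stepB]
    simp only [List.nil_append]
    by_cases hct : (period - budget) < a
    · -- first arrival after the offset: A's exec returns immediately, master applies
      have hm := master hb hp service_dur (period - budget) (a :: rest).length (a :: rest)
        (period - budget) (period + (period - budget)) ((a :: rest).length + 1) (le_refl _) (by omega)
      simp only [execA, if_neg (by omega : ¬ a ≤ period - budget)] at hm
      have h1 := congrArg Prod.fst hm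
      have h2 := congrArg Prod.snd hm
      simp only [List.nil_append] at h1 h2
      exact Prod.ext (by rw [h1]) (by rw [h2])
    · -- first arrival at/before the offset: A's IDLE block is the identity here
      have hle : a ≤ period - budget := by omega
      simp only [outerA]
      have hidle : idleA budget period (period - budget) a (period + (period - budget))
          = (period - budget, period + (period - budget)) := by
        simp only [idleA, if_pos hle]
        rw [align_closed hp _ _ _ (by push_cast; omega)]
        rw [if_neg (by omega : ¬ period + (period - budget) ≤ period - budget)]
        rw [if_neg (by omega : ¬ period + (period - budget) - period + budget ≤ period - budget)]
      rw [hidle]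
      simp only [execA, if_pos hle, bfold, if_neg (by omega : ¬ period - budget < a)]
      rw [serve_eq hb]
      have hstep := master hb hp service_dur (period - budget) rest.length rest
        (serveB budget period service_dur (period - budget) (period + (period - budget))).1
        (serveB budget period service_dur (period - budget) (period + (period - budget))).2
        ((a :: rest).length) (le_refl _) (by simp)
      simp only [] at hstep
      have h1 := congrArg Prod.fst hstep
      have h2 := congrArg Prod.snd hstep
      simp only [] at h1 h2
      simp only [List.cons_append, Prod.mk.injEq]
      exact ⟨by rw [h1], by rw [h2]⟩
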